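-- pv_equiv track=rewrite | github.com/gunmetal313/medusa | gen/arch_avr8.py | _AVR8_GetMnemonic
-- ===== SOURCE A (Python) =====
-- import string
--
-- def _AVR8_GetMnemonic(insn):
--     fmt = insn['format']
--     res = ''
--     for c in fmt:
--         if not c in string.ascii_letters + string.digits:
--             break
--         res += c
--     return res
-- ===== SOURCE B (Python) =====
-- import re
--
-- def _AVR8_GetMnemonic(insn):
--     return re.match(r'[A-Za-z0-9]*', insn['format']).group()
-- ===== Notes on version B (the rewrite author's own statement) =====
-- stated objective: idiomatic
-- what changed: The manual character loop with break and string concatenation is replaced by a single regex match of the ASCII class [A-Za-z0-9]* whose engine performs the prefix scan.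
import Mathlib
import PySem

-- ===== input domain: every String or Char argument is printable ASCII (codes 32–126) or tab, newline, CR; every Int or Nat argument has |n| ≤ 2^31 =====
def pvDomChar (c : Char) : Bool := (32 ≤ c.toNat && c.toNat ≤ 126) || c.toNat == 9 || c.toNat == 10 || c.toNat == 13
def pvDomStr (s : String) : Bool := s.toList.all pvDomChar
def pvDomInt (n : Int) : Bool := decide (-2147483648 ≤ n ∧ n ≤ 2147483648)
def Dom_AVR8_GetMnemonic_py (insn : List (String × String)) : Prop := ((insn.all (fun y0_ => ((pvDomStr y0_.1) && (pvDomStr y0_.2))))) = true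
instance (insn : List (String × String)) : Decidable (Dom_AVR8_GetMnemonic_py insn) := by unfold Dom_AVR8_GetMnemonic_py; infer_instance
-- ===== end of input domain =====

-- B replaces A's manual accumulation loop (with break) by a single regex match of
-- [A-Za-z0-9]* (ported as takeWhile over the character class); return value only,
-- no mutation involved.

-- ===== PORT A =====
-- string.ascii_letters + string.digits (the concatenated constant A tests membership in)
def pvLettersDigits : List Char :=
  ("abcdefghijklmnopqrstuvwxyzABCDEFGHIJKLMNOPQRSTUVWXYZ" ++ "0123456789").toList

-- the loop body: for c in fmt: if not c in …: break; res += c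
def pvALoop : List Char → String → String
  | [], res => res
  | c :: cs, res => if !(pvLettersDigits.contains c) then res else pvALoop cs (res.push c)

def AVR8_GetMnemonic_py (insn : List (String × String)) : String :=
  match (PySem.Dict.mk insn).get? "format" with
  | some fmt => pvALoop fmt.toList ""
  | none => ""   -- KeyError in Python; excluded by Pre_

-- ===== PORT B =====
-- the character class [A-Za-z0-9] of B's regex
def pvIsWordAscii (c : Char) : Bool :=
  ('A' ≤ c && c ≤ 'Z') || ('a' ≤ c && c ≤ 'z') || ('0' ≤ c && c ≤ '9')

-- re.match(r'[A-Za-z0-9]*', fmt).group(): the maximal prefix of class characters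
def AVR8_GetMnemonic_py_alt (insn : List (String × String)) : String :=
  match (PySem.Dict.mk insn).get? "format" with
  | some fmt => String.ofList (fmt.toList.takeWhile pvIsWordAscii)
  | none => ""   -- KeyError in Python; excluded by Pre_

-- ===== PRECONDITION & SPEC =====
-- A raises KeyError when the dict has no 'format' key; Pre_ excludes exactly that.
def Pre_AVR8_GetMnemonic_py (insn : List (String × String)) : Prop :=
  (insn.any (fun p => p.1 == "format")) = true
instance (insn : List (String × String)) : Decidable (Pre_AVR8_GetMnemonic_py insn) := by
  unfold Pre_AVR8_GetMnemonic_py; infer_instance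

def pvWitness_AVR8_GetMnemonic_py : (List (String × String)) := [("format", "ld r1, X+")]

def Spec_AVR8_GetMnemonic_py (insn : List (String × String)) (out : String) : Prop :=
  out = AVR8_GetMnemonic_py_alt insn
instance (insn : List (String × String)) (out : String) : Decidable (Spec_AVR8_GetMnemonic_py insn out) := by
  unfold Spec_AVR8_GetMnemonic_py; infer_instance

-- ===== CLAIM (what is proved, stated in full; the proofs are below) =====
def Claim_equal_AVR8_GetMnemonic_py : Prop := ∀ (insn : List (String × String)), Dom_AVR8_GetMnemonic_py insn → Pre_AVR8_GetMnemonic_py insn → Spec_AVR8_GetMnemonic_py insn (AVR8_GetMnemonic_py insn)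

-- ===== LEMMAS AND PROOFS =====
set_option maxRecDepth 10000

-- pvIsWordAscii read off on character codes
def pvBN (n : Nat) : Bool := ((65 ≤ n && n ≤ 90) || (97 ≤ n && n ≤ 122) || (48 ≤ n && n ≤ 57))

theorem pvIsWordAscii_toNat (c : Char) : pvIsWordAscii c = pvBN c.toNat := by
  simp only [pvIsWordAscii, pvBN, Char.le_def, UInt32.le_iff_toNat_le]; rfl

theorem pvLettersDigits_all_word : pvLettersDigits.all (fun x => pvBN x.toNat) = true := by decide

theorem pvWord_mem : (List.range 123).all
    (fun n => !(pvBN n) || pvLettersDigits.contains (Char.ofNat n)) = true := by decide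

-- A's membership test agrees with B's regex class on every character
theorem pvClass_eq (c : Char) : pvLettersDigits.contains c = pvIsWordAscii c := by
  rw [pvIsWordAscii_toNat]
  by_cases h : c ∈ pvLettersDigits
  · rw [List.contains_iff_mem.mpr h]
    simpa using List.all_eq_true.mp pvLettersDigits_all_word c h
  · have h1 : pvLettersDigits.contains c = false := by simpa using h
    rw [h1]
    by_contra hb
    have hb' : pvBN c.toNat = true := by revert hb; cases pvBN c.toNat <;> simp
    have hrange : c.toNat ∈ List.range 123 := by
      simp only [pvBN, Bool.or_eq_true, Bool.and_eq_true, decide_eq_true_eq] at hb'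
      simp only [List.mem_range]; omega
    have := List.all_eq_true.mp pvWord_mem _ hrange
    rw [hb'] at this
    simp only [Bool.not_true, Bool.false_or] at this
    rw [Char.ofNat_toNat] at this
    exact h (by simpa using this)

-- A's loop computes the takeWhile prefix appended to the accumulator
theorem pvALoop_eq (l : List Char) (res : String) :
    pvALoop l res = res ++ String.ofList (l.takeWhile pvIsWordAscii) := by
  induction l generalizing res with
  | nil =>
    apply String.toList_inj.mp
    simp [pvALoop]
  | cons c cs ih =>
    rw [pvALoop, pvClass_eq]
    cases hc : pvIsWordAscii c with
    | false =>
      apply String.toList_inj.mp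
      simp [hc]
    | true =>
      simp only [hc, Bool.not_true, Bool.false_eq_true, if_false, ih, List.takeWhile_cons]
      apply String.toList_inj.mp
      simp

-- ===== VERDICT (by name: the statement is the Claim_ definition above) =====
theorem AVR8_GetMnemonic_py_spec : Claim_equal_AVR8_GetMnemonic_py := by
  intro insn _hDom hPre
  unfold Spec_AVR8_GetMnemonic_py AVR8_GetMnemonic_py AVR8_GetMnemonic_py_alt
  cases hget : (PySem.Dict.mk insn).get? "format" with
  | none => rfl
  | some fmt => simpa using pvALoop_eq fmt.toList ""
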